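-- pv_equiv track=rewrite | github.com/wdconinc/bubble-sheet-auto-mark | src/bubble_mark/models/answer_key.py | _shuffle_answers
-- ===== SOURCE A (Python) =====
-- _LCG_A: int = 1664525
--
-- _LCG_C: int = 1013904223
--
-- _LCG_M: int = 2**32
--
-- def _lcg_sequence(seed: int, length: int) -> list[int]:
--     """Return *length* consecutive LCG values starting from *seed*."""
--     state = int(seed) & 0xFFFFFFFF
--     out = []
--     for _ in range(length):
--         state = (_LCG_A * state + _LCG_C) % _LCG_M
--         out.append(state)
--     return out
--
-- def _shuffle_answers(answers: str, seed: int) -> str: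
--     """Return *answers* permuted by a seeded Fisher–Yates shuffle.
--
--     When *seed* is 0 the original string is returned unchanged.  The algorithm
--     is deterministic and reversible via :func:`_unshuffle_answers`.
--
--     See https://en.wikipedia.org/wiki/Fisher%E2%80%93Yates_shuffle for a
--     description of the shuffle algorithm used here.
--     """
--     if seed == 0:
--         return answers
--     result = list(answers)
--     n = len(result)
--     if n <= 1:
--         return answers
--     lcg_vals = _lcg_sequence(seed, n - 1)
--     for i in range(n - 1, 0, -1):
--         j = lcg_vals[n - 1 - i] % (i + 1)
--         result[i], result[j] = result[j], result[i]
--     return "".join(result)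
-- ===== SOURCE B (Python) =====
-- _LCG_A: int = 1664525
-- _LCG_C: int = 1013904223
-- _LCG_M: int = 2**32
--
-- def _shuffle_answers(answers: str, seed: int) -> str:
--     """Seeded shuffle computed pointwise: record the Fisher-Yates transposition
--     sequence, then for each output position trace the composed transpositions
--     (in reverse) to find its source character -- no array is ever mutated."""
--     if seed == 0:
--         return answers
--     n = len(answers)
--     if n <= 1:
--         return answers
--     state = int(seed) & 0xFFFFFFFF
--     swaps = []
--     for i in range(n - 1, 0, -1):
--         state = (_LCG_A * state + _LCG_C) % _LCG_M
--         swaps.append((i, state % (i + 1)))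
--
--     def source(p):
--         for i, j in reversed(swaps):
--             if p == i:
--                 p = j
--             elif p == j:
--                 p = i
--         return p
--
--     return "".join(answers[source(p)] for p in range(n))
-- ===== Notes on version B (the rewrite author's own statement) =====
-- stated objective: alternative
-- what changed: B never performs an in-place shuffle: it records the transposition sequence (with a fused running LCG state) and then, for each output position independently, traces that position back through the composed transpositions to find its source character, building the result as a pure map over positions (O(n^2) pointwise evaluation of the permutation instead of A's O(n) mutating swap loop).
import Mathlib
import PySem

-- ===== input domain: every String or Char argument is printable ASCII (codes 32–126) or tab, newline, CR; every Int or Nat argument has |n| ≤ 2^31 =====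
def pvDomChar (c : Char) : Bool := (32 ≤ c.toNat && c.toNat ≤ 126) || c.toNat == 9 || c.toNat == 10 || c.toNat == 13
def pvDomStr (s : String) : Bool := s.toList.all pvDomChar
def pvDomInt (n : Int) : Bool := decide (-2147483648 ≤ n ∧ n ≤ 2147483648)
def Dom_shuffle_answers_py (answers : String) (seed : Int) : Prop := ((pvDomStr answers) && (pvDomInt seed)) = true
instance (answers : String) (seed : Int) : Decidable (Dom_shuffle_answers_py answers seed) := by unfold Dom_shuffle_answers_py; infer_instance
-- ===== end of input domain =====

-- B replaces A's in-place Fisher–Yates swap loop by a pure pointwise evaluation of the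
-- composed transposition sequence: no array is mutated (objective: alternative).

-- ===== PORT A =====
-- loop body of `for _ in range(length)` in _lcg_sequence
def pvLcgStep (st : Int × List Int) (_ : Nat) : Int × List Int :=
  let state := PySem.Int.mod (1664525 * st.1 + 1013904223) 4294967296
  (state, st.2 ++ [state])

-- _lcg_sequence; `int(seed) & 0xFFFFFFFF` is PySem.Int.band (exact on negatives)
def pvLcgSequence (seed : Int) (length : Nat) : List Int :=
  ((List.range length).foldl pvLcgStep (PySem.Int.band seed 4294967295, [])).2

-- loop body of A's Fisher–Yates loop; all indices are provably in range in A
-- (1 ≤ i ≤ n-1, 0 ≤ j ≤ i, 0 ≤ n-1-i ≤ n-2), so pyGetD/set are exact for Python indexing.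
def pvStepA (n : Nat) (lcg : List Int) (res : List Char) (i : Int) : List Char :=
  let j := PySem.Int.mod (PySem.List.pyGetD lcg ((n : Int) - 1 - i) 0) (i + 1)
  let a := PySem.List.pyGetD res i ' '
  let b := PySem.List.pyGetD res j ' '
  (res.set i.toNat b).set j.toNat a

def shuffle_answers_py (answers : String) (seed : Int) : String :=
  if seed = 0 then answers
  else
    let result := answers.toList
    let n := result.length
    if n ≤ 1 then answers
    else
      let lcg := pvLcgSequence seed (n - 1)
      String.ofList ((PySem.List.pyRange ((n : Int) - 1) 0 (-1)).foldl (pvStepA n lcg) result)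

-- ===== PORT B =====
-- loop body of B's swap-recording loop: update the running LCG state, append (i, state % (i+1))
def pvStepBuild (st : Int × List (Int × Int)) (i : Int) : Int × List (Int × Int) :=
  let s := PySem.Int.mod (1664525 * st.1 + 1013904223) 4294967296
  (s, st.2 ++ [(i, PySem.Int.mod s (i + 1))])

-- `source(p)`: trace p through the transpositions in reverse order
def pvSource (swaps : List (Int × Int)) (p : Int) : Int :=
  swaps.reverse.foldl (fun x ij => if x = ij.1 then ij.2 else if x = ij.2 then ij.1 else x) p

def shuffle_answers_py_alt (answers : String) (seed : Int) : String :=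
  if seed = 0 then answers
  else
    let chars := answers.toList
    let n := chars.length
    if n ≤ 1 then answers
    else
      let swaps := ((PySem.List.pyRange ((n : Int) - 1) 0 (-1)).foldl pvStepBuild
        (PySem.Int.band seed 4294967295, [])).2
      String.ofList ((PySem.List.pyRange 0 (n : Int) 1).map
        (fun p => PySem.List.pyGetD chars (pvSource swaps p) ' '))

-- ===== PRECONDITION & SPEC =====
def Spec_shuffle_answers_py (answers : String) (seed : Int) (out : String) : Prop := out = shuffle_answers_py_alt answers seed
instance (answers : String) (seed : Int) (out : String) : Decidable (Spec_shuffle_answers_py answers seed out) := by unfold Spec_shuffle_answers_py; infer_instance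

-- ===== CLAIM (what is proved, stated in full; the proofs are below) =====
def Claim_equal_shuffle_answers_py : Prop := ∀ (answers : String) (seed : Int), Dom_shuffle_answers_py answers seed → Spec_shuffle_answers_py answers seed (shuffle_answers_py answers seed)

-- ===== LEMMAS AND PROOFS =====

-- the LCG iterate: pvF seed k = the state after k LCG updates starting from seed & 0xFFFFFFFF
def pvF (seed : Int) : Nat → Int
  | 0 => PySem.Int.band seed 4294967295
  | k+1 => PySem.Int.mod (1664525 * pvF seed k + 1013904223) 4294967296

-- the explicit swap list both programs follow: k-th swap is (n-1-k, pvF (k+1) % (n-k))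
def pvE (seed : Int) (n : Nat) : List (Int × Int) :=
  (List.range (n - 1)).map (fun k =>
    (((n - 1 - k : Nat) : Int), PySem.Int.mod (pvF seed (k+1)) ((n - k : Nat) : Int)))

-- the transposition (i j), as a function
def pvTau (ij : Int × Int) (x : Int) : Int :=
  if x = ij.1 then ij.2 else if x = ij.2 then ij.1 else x

-- the pure form of A's loop body, with the swap pair given explicitly
def pvPureStep (res : List Char) (ij : Int × Int) : List Char :=
  (res.set ij.1.toNat (PySem.List.pyGetD res ij.2 ' ')).set ij.2.toNat
    (PySem.List.pyGetD res ij.1 ' ')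

lemma pvLcg_fold (seed : Int) : ∀ len : Nat,
    (List.range len).foldl pvLcgStep (PySem.Int.band seed 4294967295, ([] : List Int))
      = (pvF seed len, (List.range len).map (fun k => pvF seed (k+1))) := by
  intro len
  induction len with
  | zero => simp [pvF]
  | succ n ih =>
    rw [List.range_succ, List.foldl_append, ih, List.map_append]
    simp [pvLcgStep, pvF]

lemma pvLcgSequence_getD (seed : Int) (len k : Nat) (hk : k < len) :
    PySem.List.pyGetD (pvLcgSequence seed len) (k : Int) 0 = pvF seed (k+1) := by
  rw [pvLcgSequence, pvLcg_fold]
  rw [PySem.List.pyGetD_natCast]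
  rw [List.getD_eq_getElem _ _ (by simpa using hk)]
  simp

-- B's swap-building loop produces exactly pvE
lemma pvBuild_eq (seed : Int) (n : Nat) (hn : 1 ≤ n) : ∀ i : Nat, i ≤ n - 1 →
    (PySem.List.pyRange (i : Int) 0 (-1)).foldl pvStepBuild
      (pvF seed (n - 1 - i), (pvE seed n).take (n - 1 - i))
    = (pvF seed (n - 1), pvE seed n) := by
  intro i
  induction i with
  | zero =>
    intro _
    rw [show ((0:Nat):Int) = 0 from rfl, PySem.List.pyRange_neg_one_eq_nil (le_refl 0)]
    simp only [List.foldl_nil, Nat.sub_zero]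
    rw [List.take_of_length_le (by simp [pvE])]
  | succ i ih =>
    intro hi
    rw [PySem.List.pyRange_neg_one_cons (by positivity), List.foldl_cons]
    have hstep : pvStepBuild (pvF seed (n - 1 - (i+1)), (pvE seed n).take (n - 1 - (i+1))) ((i+1 : Nat) : Int)
        = (pvF seed (n - 1 - i), (pvE seed n).take (n - 1 - i)) := by
      unfold pvStepBuild
      have hsucc : n - 1 - (i+1) + 1 = n - 1 - i := by omega
      have hs : PySem.Int.mod (1664525 * pvF seed (n - 1 - (i+1)) + 1013904223) 4294967296
          = pvF seed (n - 1 - i) := by rw [← hsucc]; rfl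
      have hk : n - 1 - (i+1) < (pvE seed n).length := by simp [pvE]; omega
      have htake : (pvE seed n).take (n - 1 - i)
          = (pvE seed n).take (n - 1 - (i+1)) ++ [(pvE seed n)[n - 1 - (i+1)]] := by
        rw [← hsucc, List.take_succ, List.getElem?_eq_getElem hk]
        simp
      have hel : (pvE seed n)[n - 1 - (i+1)]'hk
          = (((i+1 : Nat) : Int), PySem.Int.mod (pvF seed (n - 1 - i)) (((i+1 : Nat) : Int) + 1)) := by
        simp only [pvE, List.getElem_map, List.getElem_range]
        have e1 : n - 1 - (n - 1 - (i+1)) = i + 1 := by omega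
        have e2 : n - (n - 1 - (i+1)) = i + 2 := by omega
        rw [e1, e2, hsucc]
        norm_cast
      rw [hs, htake, hel]
    rw [show (((i:Nat)+1 : Nat) : Int) - 1 = ((i : Nat) : Int) by push_cast; ring] at *
    rw [hstep]
    exact ih (by omega)

-- A's fold over the countdown range equals the pure fold over pvE
lemma pvA_fold_eq (seed : Int) (n : Nat) (hn : 1 ≤ n) :
    ∀ (i : Nat), i ≤ n - 1 → ∀ res : List Char,
    (PySem.List.pyRange (i : Int) 0 (-1)).foldl (pvStepA n (pvLcgSequence seed (n - 1))) res
      = ((pvE seed n).drop (n - 1 - i)).foldl pvPureStep res := by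
  intro i
  induction i with
  | zero =>
    intro _ res
    rw [show ((0:Nat):Int) = 0 from rfl, PySem.List.pyRange_neg_one_eq_nil (le_refl 0)]
    rw [List.drop_of_length_le (by simp [pvE])]
    simp
  | succ i ih =>
    intro hi res
    rw [PySem.List.pyRange_neg_one_cons (by positivity), List.foldl_cons]
    have hk : n - 1 - (i+1) < (pvE seed n).length := by simp [pvE]; omega
    have hsucc : n - 1 - (i+1) + 1 = n - 1 - i := by omega
    have hdrop : (pvE seed n).drop (n - 1 - (i+1))
        = (pvE seed n)[n - 1 - (i+1)] :: (pvE seed n).drop (n - 1 - i) := by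
      rw [List.drop_eq_getElem_cons hk, hsucc]
    have hel : (pvE seed n)[n - 1 - (i+1)]'hk
        = (((i+1 : Nat) : Int), PySem.Int.mod (pvF seed (n - 1 - i)) (((i+1 : Nat) : Int) + 1)) := by
      simp only [pvE, List.getElem_map, List.getElem_range]
      have e1 : n - 1 - (n - 1 - (i+1)) = i + 1 := by omega
      have e2 : n - (n - 1 - (i+1)) = i + 2 := by omega
      rw [e1, e2, hsucc]
      norm_cast
    have hstep : pvStepA n (pvLcgSequence seed (n - 1)) res ((i+1 : Nat) : Int)
        = pvPureStep res ((pvE seed n)[n - 1 - (i+1)]'hk) := by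
      unfold pvStepA pvPureStep
      rw [hel]
      have hidx : ((n : Int) - 1 - ((i+1 : Nat) : Int)) = ((n - 1 - (i+1) : Nat) : Int) := by omega
      rw [hidx, pvLcgSequence_getD seed (n-1) _ (by omega), hsucc]
    rw [hdrop, List.foldl_cons, hstep]
    rw [show (((i:Nat)+1 : Nat) : Int) - 1 = ((i : Nat) : Int) by push_cast; ring]
    exact ih (by omega) _

-- applying one pure swap to a map over range(n) precomposes the transposition
lemma pvStep_map (n : Nat) (h : Int → Char) (ij : Int × Int)
    (hi : 0 ≤ ij.1 ∧ ij.1 < n) (hj : 0 ≤ ij.2 ∧ ij.2 < n) :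
    pvPureStep ((PySem.List.pyRange 0 (n : Int) 1).map h) ij
      = (PySem.List.pyRange 0 (n : Int) 1).map (fun p => h (pvTau ij p)) := by
  obtain ⟨i, j⟩ := ij
  obtain ⟨hi0, hin⟩ := hi
  obtain ⟨hj0, hjn⟩ := hj
  have hlen : (PySem.List.pyRange 0 (n : Int) 1).length = n := by
    simp [PySem.List.length_pyRange_one]
  have hgetr : ∀ (x : Int), 0 ≤ x → x < n →
      PySem.List.pyGetD ((PySem.List.pyRange 0 (n : Int) 1).map h) x ' ' = h x := by
    intro x h0 h1
    exact PySem.List.pyGetD_map_pyRange_of_nonneg h _ _ ' ' h0 h1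
  unfold pvPureStep
  apply List.ext_getElem
  · simp [hlen]
  · intro t h1 h2
    have htn : t < n := by simpa [hlen] using h2
    simp only [hgetr i hi0 hin, hgetr j hj0 hjn, List.getElem_set, List.getElem_map,
      PySem.List.getElem_pyRange_one, zero_add]
    split_ifs with hj' hi'
    · have ht : (t : Int) = j := by omega
      have hv : pvTau (i, j) (t : Int) = i := by
        by_cases hij : j = i
        · simp [pvTau, ht, hij]
        · simp [pvTau, ht, hij]
      rw [hv]
    · have ht : (t : Int) = i := by omega
      have hne : (t : Int) ≠ j := by omega
      have hv : pvTau (i, j) (t : Int) = j := by simp [pvTau, ht]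
      rw [hv]
    · have hne1 : (t : Int) ≠ i := by omega
      have hne2 : (t : Int) ≠ j := by omega
      have hv : pvTau (i, j) (t : Int) = t := by simp [pvTau, hne1, hne2]
      rw [hv]

-- the core: folding pure swaps over a map equals mapping the traced source
lemma pvCore (n : Nat) : ∀ (sl : List (Int × Int)),
    (∀ ij ∈ sl, 0 ≤ ij.1 ∧ ij.1 < n ∧ 0 ≤ ij.2 ∧ ij.2 < n) → ∀ (h : Int → Char),
    sl.foldl pvPureStep ((PySem.List.pyRange 0 (n : Int) 1).map h)
      = (PySem.List.pyRange 0 (n : Int) 1).map (fun p => h (sl.foldr pvTau p)) := by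
  intro sl
  induction sl with
  | nil => intro _ h; simp
  | cons s rest ih =>
    intro hb h
    have hs := hb s (by simp)
    rw [List.foldl_cons, pvStep_map n h s ⟨hs.1, hs.2.1⟩ ⟨hs.2.2.1, hs.2.2.2⟩]
    rw [ih (fun ij hij => hb ij (by simp [hij])) (fun p => h (pvTau s p))]
    simp [List.foldr_cons]

-- bounds on the entries of pvE
lemma pvE_bounds (seed : Int) (n : Nat) (hn : 1 ≤ n) :
    ∀ ij ∈ pvE seed n, 0 ≤ ij.1 ∧ ij.1 < n ∧ 0 ≤ ij.2 ∧ ij.2 < n := by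
  intro ij hij
  simp only [pvE, List.mem_map, List.mem_range] at hij
  obtain ⟨k, hk, rfl⟩ := hij
  dsimp only
  have hpos : (0:Int) < ((n - k : Nat) : Int) := by
    have : 1 ≤ n - k := by omega
    exact_mod_cast this
  refine ⟨by positivity, ?_, PySem.Int.mod_nonneg _ hpos, ?_⟩
  · have : n - 1 - k < n := by omega
    exact_mod_cast this
  · have h1 := PySem.Int.mod_lt (pvF seed (k+1)) hpos
    have h2 : ((n - k : Nat) : Int) ≤ (n : Int) := by exact_mod_cast Nat.sub_le n k
    omega

-- pvSource is the foldr of transpositions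
lemma pvSource_eq_foldr (sl : List (Int × Int)) (p : Int) :
    pvSource sl p = sl.foldr pvTau p := by
  induction sl generalizing p with
  | nil => rfl
  | cons s rest ih =>
    show pvSource (s :: rest) p = pvTau s (rest.foldr pvTau p)
    unfold pvSource
    rw [List.reverse_cons, List.foldl_append]
    simp only [List.foldl_cons, List.foldl_nil]
    rw [← ih p]
    rfl

-- ===== VERDICT (by name: the statement is the Claim_ definition above) =====
theorem shuffle_answers_py_spec : Claim_equal_shuffle_answers_py := by
  intro answers seed _
  unfold Spec_shuffle_answers_py shuffle_answers_py shuffle_answers_py_alt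
  by_cases h0 : seed = 0
  · simp [h0]
  · by_cases h1 : answers.length ≤ 1
    · simp [h0, h1]
    · simp only [h0, if_false]
      rw [← String.length_toList] at h1
      set L := answers.toList with hL
      set n := L.length with hn
      have hn2 : 2 ≤ n := by omega
      rw [if_neg h1, if_neg h1]
      have hc : ((n : Int) - 1) = ((n - 1 : Nat) : Int) := by omega
      rw [hc]
      -- B's built swap list is pvE
      have hswaps : ((PySem.List.pyRange ((n - 1 : Nat) : Int) 0 (-1)).foldl pvStepBuild
          (PySem.Int.band seed 4294967295, [])).2 = pvE seed n := by
        have := pvBuild_eq seed n (by omega) (n - 1) le_rfl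
        rw [Nat.sub_self] at this
        simp only [List.take_zero] at this
        rw [show pvF seed 0 = PySem.Int.band seed 4294967295 from rfl] at this
        rw [this]
      -- A's fold is the pure fold over pvE
      have hA := pvA_fold_eq seed n (by omega) (n - 1) le_rfl L
      rw [Nat.sub_self, List.drop_zero] at hA
      rw [hA, hswaps]
      -- rewrite L as a map over range(n)
      have hP : (PySem.List.pyRange 0 (n : Int) 1).map
          (fun p => PySem.List.pyGetD L p ' ') = L := PySem.List.map_pyGetD_pyRange_zero' _ _
      conv_lhs => rw [← hP]
      rw [pvCore n (pvE seed n) (pvE_bounds seed n (by omega)) (fun p => PySem.List.pyGetD L p ' ')]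
      simp only [pvSource_eq_foldr]
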